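-- pv_equiv track=rewrite | github.com/aaPanel/aaPanel | class_v2/ajax_v2.py | dstringcmp
-- ===== SOURCE A (Python) =====
-- def dstringcmp(a, b):
--     if a == b:
--         return 0
--     try:
--         for i, char in enumerate(a):
--             if char == b[i]:
--                 continue
--             if char == "~":
--                 return -1
--             if b[i] == "~":
--                 return 1
--             if char.isalpha() and not b[i].isalpha():
--                 return -1
--             if not char.isalpha() and b[i].isalpha():
--                 return 1
--             if ord(char) > ord(b[i]):
--                 return 1
--             if ord(char) < ord(b[i]):
--                 return -1
--     except IndexError:
--         if char == "~":
--             return -1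
--         return 1
--     if b[len(a)] == "~":
--         return 1
--     return -1
-- ===== SOURCE B (Python) =====
-- def dstringcmp(a, b):
--     # Transform each string into rank keys ('~' < end-of-string < letters by ord < others by ord),
--     # append a terminator, and compare the key lists lexicographically.
--     def key(c):
--         if c == "~":
--             return (0, 0)
--         if c.isalpha():
--             return (2, ord(c))
--         return (3, ord(c))
--     ka = [key(c) for c in a] + [(1, 0)]
--     kb = [key(c) for c in b] + [(1, 0)]
--     return (ka > kb) - (ka < kb)
-- ===== Notes on version B (the rewrite author's own statement) =====
-- stated objective: simpler
-- what changed: Replaces the branchy exception-driven character scan with a transform-then-compare pass: each char is mapped to a rank key (tilde < terminator < letters-by-ord < others-by-ord) and the two key lists are compared lexicographically.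
import Mathlib
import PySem

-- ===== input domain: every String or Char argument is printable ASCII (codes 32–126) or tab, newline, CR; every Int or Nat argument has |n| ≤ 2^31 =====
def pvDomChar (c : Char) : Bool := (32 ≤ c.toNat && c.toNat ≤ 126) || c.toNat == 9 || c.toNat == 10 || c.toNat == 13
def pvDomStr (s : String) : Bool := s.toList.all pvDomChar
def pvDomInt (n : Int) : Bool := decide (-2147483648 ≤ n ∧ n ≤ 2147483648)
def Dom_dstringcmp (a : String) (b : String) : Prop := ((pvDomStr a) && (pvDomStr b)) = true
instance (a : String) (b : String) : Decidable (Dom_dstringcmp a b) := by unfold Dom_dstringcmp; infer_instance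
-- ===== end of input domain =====

-- B replaces A's branchy exception-based scan by mapping each string to rank keys and
-- comparing the key lists lexicographically (objective: simpler; same cost).

-- ===== PORT A =====
-- the for-loop over enumerate(a); bs[i]? = b[i] for i ≥ 0 (none = IndexError → except branch)
def dstringcmpLoop (bs : List Char) : List Char → Nat → Option Int
  | [], _ => none
  | c :: cs, i =>
    match bs[i]? with
    | none => some (if c = '~' then -1 else 1)       -- except IndexError: char is the current c
    | some bc =>
      if c = bc then dstringcmpLoop bs cs (i + 1)
      else if c = '~' then some (-1)
      else if bc = '~' then some 1
      else if PySem.Chars.isalpha c && !(PySem.Chars.isalpha bc) then some (-1)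
      else if !(PySem.Chars.isalpha c) && PySem.Chars.isalpha bc then some 1
      else if c.toNat > bc.toNat then some 1
      else if c.toNat < bc.toNat then some (-1)
      else dstringcmpLoop bs cs (i + 1)             -- loop falls through (unreachable: equal ords ⇒ equal chars)

def dstringcmp (a : String) (b : String) : Int :=
  if a = b then 0
  else
    match dstringcmpLoop b.toList a.toList 0 with
    | some r => r
    | none =>
      -- b[len(a)]: when the loop completes, a is a proper prefix of b, so the index is in range
      if b.toList[a.toList.length]? = some '~' then 1 else -1

-- ===== PORT B =====
def keyOf (c : Char) : Nat × Nat :=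
  if c = '~' then (0, 0)
  else if PySem.Chars.isalpha c then (2, c.toNat)
  else (3, c.toNat)

-- Python's lexicographic list/tuple comparison, returning (ka > kb) - (ka < kb)
def cmpKeys : List (Nat × Nat) → List (Nat × Nat) → Int
  | [], [] => 0
  | [], _ :: _ => -1
  | _ :: _, [] => 1
  | x :: xs, y :: ys =>
    if x.1 < y.1 then -1
    else if y.1 < x.1 then 1
    else if x.2 < y.2 then -1
    else if y.2 < x.2 then 1
    else cmpKeys xs ys

def dstringcmp_alt (a : String) (b : String) : Int :=
  cmpKeys (a.toList.map keyOf ++ [(1, 0)]) (b.toList.map keyOf ++ [(1, 0)])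

-- ===== PRECONDITION & SPEC =====
def Spec_dstringcmp (a : String) (b : String) (out : Int) : Prop := out = dstringcmp_alt a b
instance (a : String) (b : String) (out : Int) : Decidable (Spec_dstringcmp a b out) := by unfold Spec_dstringcmp; infer_instance

-- ===== CLAIM (what is proved, stated in full; the proofs are below) =====
def Claim_equal_dstringcmp : Prop := ∀ (a : String) (b : String), Dom_dstringcmp a b → Spec_dstringcmp a b (dstringcmp a b)

-- ===== LEMMAS AND PROOFS =====

-- list-level restatement of A's loop: index i into bs becomes structural recursion on bs.drop i
def loopL : List Char → List Char → Option Int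
  | _, [] => none
  | [], c :: _ => some (if c = '~' then -1 else 1)
  | bc :: bs', c :: cs =>
    if c = bc then loopL bs' cs
    else if c = '~' then some (-1)
    else if bc = '~' then some 1
    else if PySem.Chars.isalpha c && !(PySem.Chars.isalpha bc) then some (-1)
    else if !(PySem.Chars.isalpha c) && PySem.Chars.isalpha bc then some 1
    else if c.toNat > bc.toNat then some 1
    else if c.toNat < bc.toNat then some (-1)
    else loopL bs' cs

lemma loop_eq_loopL (bs : List Char) : ∀ (cs : List Char) (i : Nat),
    dstringcmpLoop bs cs i = loopL (bs.drop i) cs := by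
  intro cs
  induction cs with
  | nil => intro i; cases bs.drop i <;> simp [dstringcmpLoop, loopL]
  | cons c cs ih =>
    intro i
    have hget : bs[i]? = (bs.drop i).head? := by
      cases hd : bs.drop i with
      | nil =>
        have hle : bs.length ≤ i := List.drop_eq_nil_iff.mp hd
        simp [List.getElem?_eq_none hle]
      | cons bc bs' =>
        have h0 : bs[i]? = (bs.drop i)[0]? := by
          rw [List.getElem?_drop]; simp
        simp [h0, hd]
    cases hd : bs.drop i with
    | nil =>
      rw [hd] at hget
      simp [dstringcmpLoop, loopL, hget]
    | cons bc bs' =>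
      rw [hd] at hget
      simp only [List.head?] at hget
      have hdrop : bs.drop (i + 1) = bs' := by
        rw [← List.tail_drop, hd]; rfl
      simp only [dstringcmpLoop, loopL, hget, ih, hdrop]

lemma keyOf_tilde : keyOf '~' = (0, 0) := by simp [keyOf]

lemma keyOf_fst_ge (c : Char) (h : c ≠ '~') : 2 ≤ (keyOf c).1 := by
  by_cases ha : PySem.Chars.isalpha c <;> simp [keyOf, h, ha]

-- the combined list-level statement of A equals B's transform-then-compare
lemma main_lemma : ∀ (as bs : List Char),
    (if as = bs then (0 : Int)
     else
       match loopL bs as with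
       | some r => r
       | none => if bs[as.length]? = some '~' then 1 else -1)
    = cmpKeys (as.map keyOf ++ [(1, 0)]) (bs.map keyOf ++ [(1, 0)]) := by
  intro as
  induction as with
  | nil =>
    intro bs
    cases bs with
    | nil => simp [cmpKeys]
    | cons bc bs' =>
      by_cases hb : bc = '~'
      · simp [loopL, hb, cmpKeys, keyOf_tilde]
      · have h2 := keyOf_fst_ge bc hb
        simp only [List.map, List.cons_append, List.nil_append]
        have : cmpKeys [(1,0)] (keyOf bc :: (bs'.map keyOf ++ [(1,0)])) = -1 := by
          simp only [cmpKeys]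
          have h1 : (1 : Nat) < (keyOf bc).1 := by omega
          simp [h1]
        simp [loopL, hb, this]
  | cons c cs ih =>
    intro bs
    cases bs with
    | nil =>
      by_cases hc : c = '~'
      · simp [loopL, hc, cmpKeys, keyOf_tilde]
      · have h2 := keyOf_fst_ge c hc
        simp only [List.map, List.cons_append, List.nil_append]
        have : cmpKeys (keyOf c :: (cs.map keyOf ++ [(1,0)])) [(1,0)] = 1 := by
          simp only [cmpKeys]
          have h1 : (1 : Nat) < (keyOf c).1 := by omega
          have h1' : ¬ (keyOf c).1 < 1 := by omega
          simp [h1, h1']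
        simp [loopL, hc, this]
    | cons bc bs' =>
      by_cases hcb : c = bc
      · -- equal heads: both sides recurse
        subst hcb
        have heq : (c :: cs = c :: bs') ↔ (cs = bs') := by simp
        have hrhs : cmpKeys (keyOf c :: (cs.map keyOf ++ [(1,0)]))
            (keyOf c :: (bs'.map keyOf ++ [(1,0)]))
            = cmpKeys (cs.map keyOf ++ [(1,0)]) (bs'.map keyOf ++ [(1,0)]) := by
          simp [cmpKeys]
        have hidx : (c :: bs')[(c :: cs).length]? = bs'[cs.length]? := by
          simp
        by_cases h : cs = bs'
        · subst h
          simp only [List.map, List.cons_append]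
          rw [hrhs, ← ih cs]
          simp
        · have hne : ¬ (c :: cs = c :: bs') := by simp [h]
          simp only [List.map, List.cons_append]
          rw [hrhs, ← ih bs']
          simp only [loopL, hidx]
          simp [h, hne]
      · -- differing heads: loop returns; compare keys
        have hne : ¬ (c :: cs = bc :: bs') := by simp [hcb]
        simp only [List.map, List.cons_append]
        by_cases hc : c = '~'
        · subst hc
          have hb : bc ≠ '~' := fun h => hcb h.symm
          have h2 := keyOf_fst_ge bc hb
          have : cmpKeys (keyOf '~' :: (cs.map keyOf ++ [(1,0)]))
              (keyOf bc :: (bs'.map keyOf ++ [(1,0)])) = -1 := by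
            simp only [cmpKeys, keyOf_tilde]
            have h1 : (0 : Nat) < (keyOf bc).1 := by omega
            simp [h1]
          simp [loopL, hne, hcb, this]
        · by_cases hb : bc = '~'
          · subst hb
            have h2 := keyOf_fst_ge c hc
            have : cmpKeys (keyOf c :: (cs.map keyOf ++ [(1,0)]))
                (keyOf '~' :: (bs'.map keyOf ++ [(1,0)])) = 1 := by
              simp only [cmpKeys, keyOf_tilde]
              have h1 : (0 : Nat) < (keyOf c).1 := by omega
              have h1' : ¬ (keyOf c).1 < 0 := by omega
              simp [h1, h1']
            simp [loopL, hne, hcb, this]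
          · -- neither is '~'
            by_cases hac : PySem.Chars.isalpha c = true
            · by_cases hab : PySem.Chars.isalpha bc = true
              · -- both alpha: keys (2, ord) vs (2, ord)
                have hkc : keyOf c = (2, c.toNat) := by simp [keyOf, hc, hac]
                have hkb : keyOf bc = (2, bc.toNat) := by simp [keyOf, hb, hab]
                have hord : c.toNat ≠ bc.toNat := by
                  intro h
                  exact hcb (Char.ext (UInt32.toNat_inj.mp h))
                rcases Nat.lt_or_ge c.toNat bc.toNat with hlt | hge
                · have hgt : ¬ bc.toNat < c.toNat := by omega
                  simp [loopL, hne, hcb, hc, hb, hac, hab, hkc, hkb, cmpKeys, hlt, hgt]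
                · have hlt : bc.toNat < c.toNat := by omega
                  simp [loopL, hne, hcb, hc, hb, hac, hab, hkc, hkb, cmpKeys, hlt, Nat.lt_asymm hlt]
              · -- c alpha, bc not: keys (2,_) < (3,_)
                have hkc : keyOf c = (2, c.toNat) := by simp [keyOf, hc, hac]
                have hkb : keyOf bc = (3, bc.toNat) := by simp [keyOf, hb, hab]
                simp [loopL, hne, hcb, hc, hb, hac, hab, hkc, hkb, cmpKeys]
            · by_cases hab : PySem.Chars.isalpha bc = true
              · have hkc : keyOf c = (3, c.toNat) := by simp [keyOf, hc, hac]
                have hkb : keyOf bc = (2, bc.toNat) := by simp [keyOf, hb, hab]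
                simp [loopL, hne, hcb, hc, hb, hac, hab, hkc, hkb, cmpKeys]
              · -- neither alpha: keys (3, ord) vs (3, ord)
                have hkc : keyOf c = (3, c.toNat) := by simp [keyOf, hc, hac]
                have hkb : keyOf bc = (3, bc.toNat) := by simp [keyOf, hb, hab]
                have hord : c.toNat ≠ bc.toNat := by
                  intro h
                  exact hcb (Char.ext (UInt32.toNat_inj.mp h))
                rcases Nat.lt_or_ge c.toNat bc.toNat with hlt | hge
                · have hgt : ¬ bc.toNat < c.toNat := by omega
                  simp [loopL, hne, hcb, hc, hb, hac, hab, hkc, hkb, cmpKeys, hlt, hgt]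
                · have hlt : bc.toNat < c.toNat := by omega
                  simp [loopL, hne, hcb, hc, hb, hac, hab, hkc, hkb, cmpKeys, hlt, Nat.lt_asymm hlt]

lemma string_eq_iff_toList (a b : String) : a = b ↔ a.toList = b.toList := by
  constructor
  · intro h; rw [h]
  · intro h; exact String.ext (by simpa [String.toList] using h)

-- ===== VERDICT (by name: the statement is the Claim_ definition above) =====
theorem dstringcmp_spec : Claim_equal_dstringcmp := by
  intro a b _
  unfold Spec_dstringcmp dstringcmp dstringcmp_alt
  rw [loop_eq_loopL, List.drop_zero, ← main_lemma a.toList b.toList]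
  by_cases h : a = b
  · simp [h]
  · have : a.toList ≠ b.toList := fun hh => h ((string_eq_iff_toList a b).mpr hh)
    simp [h, this]
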